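-- pv_equiv track=rewrite | github.com/ryb-spec/chumash-question-engine | engine/flow_builder.py | non_divine_phrase_fallback
-- ===== SOURCE A (Python) =====
-- def non_divine_phrase_fallback(text):
--     rendered = " ".join(str(text or "").split())
--     replacements = (
--         ("and the LORD God ", "and someone else "),
--         ("and the LORD ", "and someone else "),
--         ("and God ", "and someone else "),
--         ("the LORD God ", "someone else "),
--         ("the LORD ", "someone else "),
--         ("God ", "someone else "),
--     )
--     for prefix, replacement in replacements:
--         if rendered.startswith(prefix):
--             return f"{replacement}{rendered[len(prefix):]}".strip()
--     return None
-- ===== SOURCE B (Python) =====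
-- def non_divine_phrase_fallback(text):
--     rendered = " ".join(str(text or "").split())
--     leading_and = rendered.startswith("and ")
--     rest = rendered[4:] if leading_and else rendered
--     for stem in ("the LORD God ", "the LORD ", "God "):
--         if rest.startswith(stem):
--             head = "and someone else " if leading_and else "someone else "
--             return (head + rest[len(stem):]).strip()
--     return None
-- ===== Notes on version B (the rewrite author's own statement) =====
-- stated objective: alternative
-- what changed: B replaces A's flat six-entry prefix/replacement table by factoring it into a leading-conjunction flag plus a three-stem loop on the remainder.
import Mathlib
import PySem

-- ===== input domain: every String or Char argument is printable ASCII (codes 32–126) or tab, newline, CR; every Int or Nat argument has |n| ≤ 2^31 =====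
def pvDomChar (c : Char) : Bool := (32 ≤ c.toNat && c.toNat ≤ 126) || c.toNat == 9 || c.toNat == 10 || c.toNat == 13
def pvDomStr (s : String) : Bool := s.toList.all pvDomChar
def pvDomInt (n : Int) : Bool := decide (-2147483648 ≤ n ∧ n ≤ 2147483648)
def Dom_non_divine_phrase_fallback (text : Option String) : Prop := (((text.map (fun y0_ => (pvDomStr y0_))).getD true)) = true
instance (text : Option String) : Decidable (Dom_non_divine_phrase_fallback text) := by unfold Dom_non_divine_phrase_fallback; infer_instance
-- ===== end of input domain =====

-- B factors A's flat six-entry prefix table into a leading-conjunction flag plus a three-stem loop;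
-- same cost, alternative decomposition.

-- ===== PORT A =====
-- the for-loop over the replacements tuple with early return;
-- rendered[len(prefix):] is List.drop prefix.length (exact: the start bound is a nonnegative literal)
def pvLoopA (r : List Char) : List (List Char × List Char) → Option (List Char)
  | [] => none
  | (p, rep) :: rest =>
    if PySem.Chars.startswith r p then
      some (PySem.Chars.strip (rep ++ r.drop p.length))
    else pvLoopA r rest

def non_divine_phrase_fallback (text : Option String) : Option String :=
  -- rendered = " ".join(str(text or "").split())  (some "" is falsy, so 'text or ""' is text.getD "")
  let rendered := PySem.Chars.join " ".toList (PySem.Chars.split₀ (text.getD "").toList)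
  (pvLoopA rendered
    [("and the LORD God ".toList, "and someone else ".toList),
     ("and the LORD ".toList, "and someone else ".toList),
     ("and God ".toList, "and someone else ".toList),
     ("the LORD God ".toList, "someone else ".toList),
     ("the LORD ".toList, "someone else ".toList),
     ("God ".toList, "someone else ".toList)]).map String.ofList

-- ===== PORT B =====
-- the for-loop over the three stems with early return; rest[len(stem):] is List.drop (exact, as above)
def pvLoopB (leadingAnd : Bool) (rest : List Char) : List (List Char) → Option (List Char)
  | [] => none
  | stem :: stems =>
    if PySem.Chars.startswith rest stem then
      some (PySem.Chars.strip
        ((if leadingAnd then "and someone else ".toList else "someone else ".toList) ++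
          rest.drop stem.length))
    else pvLoopB leadingAnd rest stems

def non_divine_phrase_fallback_alt (text : Option String) : Option String :=
  let rendered := PySem.Chars.join " ".toList (PySem.Chars.split₀ (text.getD "").toList)
  let leadingAnd := PySem.Chars.startswith rendered "and ".toList
  let rest := if leadingAnd then rendered.drop 4 else rendered
  (pvLoopB leadingAnd rest
    ["the LORD God ".toList, "the LORD ".toList, "God ".toList]).map String.ofList

-- ===== PRECONDITION & SPEC =====
def Spec_non_divine_phrase_fallback (text : Option String) (out : Option String) : Prop := out = non_divine_phrase_fallback_alt text
instance (text : Option String) (out : Option String) : Decidable (Spec_non_divine_phrase_fallback text out) := by unfold Spec_non_divine_phrase_fallback; infer_instance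

-- ===== CLAIM (what is proved, stated in full; the proofs are below) =====
def Claim_equal_non_divine_phrase_fallback : Prop := ∀ (text : Option String), Dom_non_divine_phrase_fallback text → Spec_non_divine_phrase_fallback text (non_divine_phrase_fallback text)

-- ===== LEMMAS AND PROOFS =====

-- startswith of a longer prefix fails when the shorter one does
theorem pv_startswith_append_false (r u p : List Char)
    (h : PySem.Chars.startswith r u = false) :
    PySem.Chars.startswith r (u ++ p) = false := by
  by_contra hc
  have h1 : PySem.Chars.startswith r (u ++ p) = true := by
    cases hx : PySem.Chars.startswith r (u ++ p) <;> simp_all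
  have h2 := (PySem.Chars.startswith_iff r (u ++ p)).mp h1
  have h3 : u <+: r := (u.prefix_append p).trans h2
  have := (PySem.Chars.startswith_iff r u).mpr h3
  simp_all

theorem pv_core (r : List Char) :
    pvLoopA r
      [("and the LORD God ".toList, "and someone else ".toList),
       ("and the LORD ".toList, "and someone else ".toList),
       ("and God ".toList, "and someone else ".toList),
       ("the LORD God ".toList, "someone else ".toList),
       ("the LORD ".toList, "someone else ".toList),
       ("God ".toList, "someone else ".toList)] =
    pvLoopB (PySem.Chars.startswith r "and ".toList)
      (if PySem.Chars.startswith r "and ".toList then r.drop 4 else r)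
      ["the LORD God ".toList, "the LORD ".toList, "God ".toList] := by
  have e0 : "and ".toList = ['a','n','d',' '] := by decide
  have e1 : "and the LORD God ".toList
      = ['a','n','d',' '] ++ "the LORD God ".toList := by decide
  have e2 : "and the LORD ".toList = ['a','n','d',' '] ++ "the LORD ".toList := by decide
  have e3 : "and God ".toList = ['a','n','d',' '] ++ "God ".toList := by decide
  by_cases h : PySem.Chars.startswith r "and ".toList = true
  · obtain ⟨t, ht⟩ := (PySem.Chars.startswith_iff r "and ".toList).mp h
    rw [e0] at ht
    subst ht
    rw [h] at *
    simp [pvLoopA, pvLoopB, e1, e2, e3, PySem.Chars.startswith_iff,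
      List.cons_prefix_cons]
  · have h' : PySem.Chars.startswith r "and ".toList = false := by
      cases hx : PySem.Chars.startswith r "and ".toList <;> simp_all
    have h'' : PySem.Chars.startswith r ['a','n','d',' '] = false := by rw [← e0]; exact h'
    have f1 : PySem.Chars.startswith r "and the LORD God ".toList = false := by
      rw [e1]; exact pv_startswith_append_false r _ _ h''
    have f2 : PySem.Chars.startswith r "and the LORD ".toList = false := by
      rw [e2]; exact pv_startswith_append_false r _ _ h''
    have f3 : PySem.Chars.startswith r "and God ".toList = false := by
      rw [e3]; exact pv_startswith_append_false r _ _ h''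
    simp at f1 f2 f3 h'
    simp [pvLoopA, pvLoopB, h', f1, f2, f3]

-- ===== VERDICT (by name: the statement is the Claim_ definition above) =====
theorem non_divine_phrase_fallback_spec : Claim_equal_non_divine_phrase_fallback := by
  intro text _
  unfold Spec_non_divine_phrase_fallback non_divine_phrase_fallback non_divine_phrase_fallback_alt
  exact congrArg (Option.map String.ofList) (pv_core _)
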